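-- pv_equiv track=rewrite | github.com/agenitrini/MapColoring | MapColoring.py | sontvoisins
-- ===== SOURCE A (Python) =====
-- def neighbours(pt):
--     x, y = pt
--     L = []
--     for i in [-1, 1]:
--         L.append((x + i, y))
--     for j in [-1, 1]:
--         L.append((x, y + j))
--     return L
--
-- def sontvoisins(F, G):
--     H = F & G
--     for h in H:
--         N = neighbours(h)
--         for n in N:
--             if n in H:
--                 return True
--     return False
-- ===== SOURCE B (Python) =====
-- def sontvoisins(F, G):
--     H = F & G
--     right = {(x + 1, y) for (x, y) in H}
--     up = {(x, y + 1) for (x, y) in H}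
--     return bool(H & right or H & up)
-- ===== Notes on version B (the rewrite author's own statement) =====
-- stated objective: idiomatic
-- what changed: Replaces the per-cell loop over each intersection cell's four neighbours (with early return) by whole-set intersections of the intersection with its right- and up-shifted copies, relying on symmetry of adjacency.
import Mathlib
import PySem

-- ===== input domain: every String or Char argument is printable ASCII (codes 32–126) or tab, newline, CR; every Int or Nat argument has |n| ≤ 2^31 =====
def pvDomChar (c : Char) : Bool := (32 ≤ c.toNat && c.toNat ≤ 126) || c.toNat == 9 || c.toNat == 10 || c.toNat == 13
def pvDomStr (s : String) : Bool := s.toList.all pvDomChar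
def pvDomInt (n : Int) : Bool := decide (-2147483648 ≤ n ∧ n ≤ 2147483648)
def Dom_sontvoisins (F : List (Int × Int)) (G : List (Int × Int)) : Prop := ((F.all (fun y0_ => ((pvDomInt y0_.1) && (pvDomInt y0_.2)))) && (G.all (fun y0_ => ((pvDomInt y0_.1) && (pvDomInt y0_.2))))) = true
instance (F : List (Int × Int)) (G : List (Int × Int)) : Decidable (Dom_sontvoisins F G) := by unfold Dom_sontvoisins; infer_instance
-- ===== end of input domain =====

-- B replaces A's per-cell neighbour loop with early return by two whole-set
-- intersections of H = F & G with its right- and up-shifted copies (idiomatic,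
-- same asymptotic cost; adjacency is symmetric so two directions suffice).

-- ===== PORT A =====
def neighbours_a (pt : Int × Int) : List (Int × Int) :=
  let x := pt.1
  let y := pt.2
  let L : List (Int × Int) := []
  let L := [(-1 : Int), 1].foldl (fun L i => L ++ [(x + i, y)]) L
  let L := [(-1 : Int), 1].foldl (fun L j => L ++ [(x, y + j)]) L
  L

def sontvoisins (F : List (Int × Int)) (G : List (Int × Int)) : Bool :=
  let H := PySem.Set.inter (PySem.Set.ofList F) G
  -- 'for h in H: for n in neighbours(h): if n in H: return True / return False'
  H.any fun h => (neighbours_a h).any fun n => PySem.Set.contains H n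

-- ===== PORT B =====
def sontvoisins_alt (F : List (Int × Int)) (G : List (Int × Int)) : Bool :=
  let H := PySem.Set.inter (PySem.Set.ofList F) G
  let right := PySem.Set.ofList (H.map fun p => (p.1 + 1, p.2))
  let up := PySem.Set.ofList (H.map fun p => (p.1, p.2 + 1))
  !(PySem.Set.inter H right).isEmpty || !(PySem.Set.inter H up).isEmpty

-- ===== PRECONDITION & SPEC =====
def Spec_sontvoisins (F : List (Int × Int)) (G : List (Int × Int)) (out : Bool) : Prop := out = sontvoisins_alt F G
instance (F : List (Int × Int)) (G : List (Int × Int)) (out : Bool) : Decidable (Spec_sontvoisins F G out) := by unfold Spec_sontvoisins; infer_instance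

-- ===== CLAIM (what is proved, stated in full; the proofs are below) =====
def Claim_equal_sontvoisins : Prop := ∀ (F : List (Int × Int)) (G : List (Int × Int)), Dom_sontvoisins F G → Spec_sontvoisins F G (sontvoisins F G)

-- ===== LEMMAS AND PROOFS =====
theorem neighbours_a_eq (pt : Int × Int) :
    neighbours_a pt = [(pt.1 - 1, pt.2), (pt.1 + 1, pt.2), (pt.1, pt.2 - 1), (pt.1, pt.2 + 1)] := by
  simp [neighbours_a, List.foldl]
  constructor <;> ring

-- Core equivalence on any set H: some cell of H has a neighbour in H iff H meets
-- its right-shifted copy or its up-shifted copy.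
theorem core_eq (H : List (Int × Int)) :
    (H.any fun h => (neighbours_a h).any fun n => PySem.Set.contains H n)
    = (!(PySem.Set.inter H (PySem.Set.ofList (H.map fun p => (p.1 + 1, p.2)))).isEmpty
       || !(PySem.Set.inter H (PySem.Set.ofList (H.map fun p => (p.1, p.2 + 1)))).isEmpty) := by
  rw [Bool.eq_iff_iff]
  simp only [List.any_eq_true, neighbours_a_eq, Bool.or_eq_true, Bool.not_eq_true',
    List.isEmpty_eq_false_iff_exists_mem, PySem.Set.mem_inter, PySem.Set.mem_ofList,
    List.mem_map, List.mem_cons, List.not_mem_nil, or_false,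
    PySem.Set.contains_iff]
  constructor
  · rintro ⟨⟨a, b⟩, hH, n, hn, hnH⟩
    rcases hn with h1 | h2 | h3 | h4
    · subst h1; exact Or.inl ⟨(a, b), hH, (a - 1, b), hnH, by simp⟩
    · subst h2; exact Or.inl ⟨(a + 1, b), hnH, (a, b), hH, rfl⟩
    · subst h3; exact Or.inr ⟨(a, b), hH, (a, b - 1), hnH, by simp⟩
    · subst h4; exact Or.inr ⟨(a, b + 1), hnH, (a, b), hH, rfl⟩
  · rintro (⟨z, hzH, ⟨a, b⟩, hH, hz⟩ | ⟨z, hzH, ⟨a, b⟩, hH, hz⟩)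
    · exact ⟨(a, b), hH, (a + 1, b), by simp, hz ▸ hzH⟩
    · exact ⟨(a, b), hH, (a, b + 1), by simp, hz ▸ hzH⟩

-- ===== VERDICT (by name: the statement is the Claim_ definition above) =====
theorem sontvoisins_spec : Claim_equal_sontvoisins := by
  intro F G _
  unfold Spec_sontvoisins sontvoisins sontvoisins_alt
  exact core_eq _
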